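-- pv_equiv track=rewrite | github.com/toggame/Python_learn | 第四章/num_to_rmb.py | four_to_han_str
-- ===== SOURCE A (Python) =====
-- han_list = ['零', '壹', '贰', '叁', '肆', '伍', '陆', '柒', '捌', '玖']  # 数值转换文本列表
--
-- unit_list = ['拾', '佰', '仟']  # 数值单位列表
--
-- def four_to_han_str(num_str):
--     result = ''
--     num_len = len(num_str)
--     # 依次遍历数字字符串的每一位数字
--     for i in range(num_len):
--         num = int(num_str[i])
--         # 最后一位为0时，不输出
--         if i == num_len - 1 and num == 0:
--             continue
--         # 当不是最后一位且不为0时，带单位输出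
--         elif i != num_len - 1 and num != 0:
--             result += han_list[num] + unit_list[-(4 - num_len + i) - 1]
--         # 当连续2个0时，推后输出
--         elif i < num_len - 1 and num_str[i] == num_str[i + 1] == '0':
--             continue
--         # 最后一位或非最后一位0时，仅输出汉字，不添加单位
--         else:
--             result += han_list[num]
--     return result
-- ===== SOURCE B (Python) =====
-- han_list = ['零', '壹', '贰', '叁', '肆', '伍', '陆', '柒', '捌', '玖']
--
-- unit_list = ['拾', '佰', '仟']
--
-- def four_to_han_str(num_str):
--     num_len = len(num_str)
--     # phase 1: annotate every digit (a '零' marker for 0, hanzi+unit otherwise)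
--     raw = ''
--     for i in range(num_len):
--         num = int(num_str[i])
--         if num == 0:
--             raw += '零'
--         else:
--             raw += han_list[num]
--             if i != num_len - 1:
--                 raw += unit_list[-(4 - num_len + i) - 1]
--     # phase 2: collapse runs of '零' and drop a trailing '零'
--     out = []
--     for c in raw:
--         if c == '零' and out and out[-1] == '零':
--             continue
--         out.append(c)
--     if out and out[-1] == '零':
--         out.pop()
--     return ''.join(out)
-- ===== Notes on version B (the rewrite author's own statement) =====
-- stated objective: alternative
-- what changed: B separates generation from zero-normalization: it annotates every digit in one pass (a '零' marker for each 0, hanzi plus positional unit otherwise) and then collapses adjacent '零' and strips a trailing '零' in a cleanup pass, instead of A's inline lookahead/last-position skip conditions.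
import Mathlib
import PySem

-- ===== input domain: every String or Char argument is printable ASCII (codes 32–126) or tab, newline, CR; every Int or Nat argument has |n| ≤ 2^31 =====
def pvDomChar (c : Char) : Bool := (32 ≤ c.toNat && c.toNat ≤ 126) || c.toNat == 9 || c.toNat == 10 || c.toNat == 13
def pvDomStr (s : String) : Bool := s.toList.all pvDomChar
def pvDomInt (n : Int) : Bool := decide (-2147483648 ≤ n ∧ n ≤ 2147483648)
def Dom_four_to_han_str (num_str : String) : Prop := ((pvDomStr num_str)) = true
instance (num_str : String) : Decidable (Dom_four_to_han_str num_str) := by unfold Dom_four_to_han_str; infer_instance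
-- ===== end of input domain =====

set_option maxRecDepth 10000


-- B separates generation from zero-normalization (annotate every digit, then collapse '零' runs
-- and strip a trailing '零') instead of A's inline lookahead skip conditions; objective: alternative.

-- ===== PORT A =====
def hanListA : List String := ["零", "壹", "贰", "叁", "肆", "伍", "陆", "柒", "捌", "玖"]

def unitListA : List String := ["拾", "佰", "仟"]

-- loop body of A's for-loop (result is the accumulator, i the loop index)
def stepA (cs : List Char) (numLen : Int) (result : String) (i : Int) : String :=
  let num : Int := (PySem.Int.ofStr? (String.ofList [(PySem.List.pyGet? cs i).getD ' '])).getD 0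
  if i = numLen - 1 ∧ num = 0 then result
  else if i ≠ numLen - 1 ∧ num ≠ 0 then
    result ++ ((PySem.List.pyGet? hanListA num).getD "" ++ (PySem.List.pyGet? unitListA (-(4 - numLen + i) - 1)).getD "")
  else if i < numLen - 1 ∧ (PySem.List.pyGet? cs i).getD ' ' = '0' ∧ (PySem.List.pyGet? cs (i + 1)).getD ' ' = '0' then result
  else result ++ (PySem.List.pyGet? hanListA num).getD ""

def four_to_han_str (num_str : String) : String :=
  let cs := num_str.toList
  let numLen : Int := cs.length
  (PySem.List.pyRange 0 numLen 1).foldl (stepA cs numLen) ""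

-- ===== PORT B =====
-- phase-1 loop body: annotate digit i ('零' marker for 0, hanzi plus unit otherwise)
def stepB (cs : List Char) (numLen : Int) (raw : String) (i : Int) : String :=
  let num : Int := (PySem.Int.ofStr? (String.ofList [(PySem.List.pyGet? cs i).getD ' '])).getD 0
  if num = 0 then raw ++ "零"
  else
    let raw := raw ++ (PySem.List.pyGet? hanListA num).getD ""
    if i ≠ numLen - 1 then raw ++ (PySem.List.pyGet? unitListA (-(4 - numLen + i) - 1)).getD "" else raw

-- phase-2 loop body: append c unless it repeats a '零'
def stepD (out : List Char) (c : Char) : List Char :=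
  if c = '零' ∧ out ≠ [] ∧ out.getLast? = some '零' then out else out ++ [c]

def four_to_han_str_alt (num_str : String) : String :=
  let cs := num_str.toList
  let numLen : Int := cs.length
  let raw := (PySem.List.pyRange 0 numLen 1).foldl (stepB cs numLen) ""
  let out := raw.toList.foldl stepD []
  let out := if out ≠ [] ∧ out.getLast? = some '零' then out.dropLast else out
  String.ofList out

-- ===== PRECONDITION & SPEC =====
-- Exactly the inputs where Python A returns: every character a decimal digit (otherwise int()
-- raises ValueError) and every digit more than 7 places from the end equal to zero (otherwise
-- the unit lookup unit_list[-(4 - num_len + i) - 1] raises IndexError).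
def Pre_four_to_han_str (num_str : String) : Prop :=
  (num_str.toList.all (fun c => ['0', '1', '2', '3', '4', '5', '6', '7', '8', '9'].contains c) = true) ∧
  ((num_str.toList.take (num_str.toList.length - 7)).all (fun c => c == '0') = true)

instance (num_str : String) : Decidable (Pre_four_to_han_str num_str) := by
  unfold Pre_four_to_han_str; infer_instance

def pvWitness_four_to_han_str : String := "10"

def Spec_four_to_han_str (num_str : String) (out : String) : Prop := out = four_to_han_str_alt num_str
instance (num_str : String) (out : String) : Decidable (Spec_four_to_han_str num_str out) := by unfold Spec_four_to_han_str; infer_instance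

-- ===== CLAIM (what is proved, stated in full; the proofs are below) =====
def Claim_equal_four_to_han_str : Prop := ∀ (num_str : String), Dom_four_to_han_str num_str → Pre_four_to_han_str num_str → Spec_four_to_han_str num_str (four_to_han_str num_str)

-- ===== LEMMAS AND PROOFS =====

def DIG : List Char := ['0', '1', '2', '3', '4', '5', '6', '7', '8', '9']

-- the string one digit character annotates with (han_list[int(c)] as both ports compute it)
def hanD (c : Char) : String :=
  (PySem.List.pyGet? hanListA ((PySem.Int.ofStr? (String.ofList [c])).getD 0)).getD ""

-- the unit character for a digit with r characters to its right (same index expression as the ports)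
def unitR (r : Nat) : String :=
  (PySem.List.pyGet? unitListA ((r : Int) - 4)).getD ""

-- what A's loop appends for a suffix of the digit string
def gA : List Char → String
  | [] => ""
  | [d] => if d = '0' then "" else hanD d
  | d :: d' :: rest =>
      (if d = '0' then (if d' = '0' then "" else "零") else hanD d ++ unitR (rest.length + 1)) ++
        gA (d' :: rest)

-- what B's phase-1 loop appends for a suffix, as a character list
def gBL : List Char → List Char
  | [] => []
  | [d] => if d = '0' then ['零'] else (hanD d).toList
  | d :: d' :: rest =>
      (if d = '0' then ['零'] else (hanD d).toList ++ (unitR (rest.length + 1)).toList) ++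
        gBL (d' :: rest)

-- B's phase 2, with p = "last emitted character was '零'"
def dedupZ (p : Bool) : List Char → List Char
  | [] => []
  | c :: cs => if c = '零' ∧ p = true then dedupZ p cs else c :: dedupZ (c == '零') cs

def stripZ (xs : List Char) : List Char :=
  if xs.getLast? = some '零' then xs.dropLast else xs

theorem getLastQ_append_right (l m : List Char) (h : m ≠ []) : (l ++ m).getLast? = m.getLast? := by
  rcases List.exists_cons_of_ne_nil h with ⟨a, t, rfl⟩
  rw [List.getLast?_append]
  cases hm : (a :: t).getLast? with
  | none => exact absurd (List.getLast?_eq_none_iff.mp hm) (by simp)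
  | some x => simp

theorem getLastQ_cons (c : Char) (l : List Char) (h : l ≠ []) : (c :: l).getLast? = l.getLast? := by
  simpa using getLastQ_append_right [c] l h

theorem stripZ_cons (c : Char) (l : List Char) (h : l ≠ []) :
    stripZ (c :: l) = c :: stripZ l := by
  unfold stripZ
  rw [getLastQ_cons c l h, List.dropLast_cons_of_ne_nil h]
  split <;> rfl

theorem stripZ_append (l m : List Char) (h : m ≠ []) :
    stripZ (l ++ m) = l ++ stripZ m := by
  unfold stripZ
  rw [getLastQ_append_right l m h, List.dropLast_append_of_ne_nil h]
  split <;> rfl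

theorem dedupZ_false_ne_nil (xs : List Char) (h : xs ≠ []) : dedupZ false xs ≠ [] := by
  rcases List.exists_cons_of_ne_nil h with ⟨c, t, rfl⟩
  simp [dedupZ]

theorem digit_num_zero (d : Char) (hd : d ∈ DIG) :
    (((PySem.Int.ofStr? (String.ofList [d])).getD 0 = 0) ↔ d = '0') := by
  fin_cases hd <;> simp_all <;> decide

theorem hanD_single (d : Char) (hd : d ∈ DIG) (h0 : d ≠ '0') :
    ∃ c : Char, (hanD d).toList = [c] ∧ c ≠ '零' := by
  fin_cases hd
  · exact absurd rfl h0
  · exact ⟨'壹', by decide, by decide⟩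
  · exact ⟨'贰', by decide, by decide⟩
  · exact ⟨'叁', by decide, by decide⟩
  · exact ⟨'肆', by decide, by decide⟩
  · exact ⟨'伍', by decide, by decide⟩
  · exact ⟨'陆', by decide, by decide⟩
  · exact ⟨'柒', by decide, by decide⟩
  · exact ⟨'捌', by decide, by decide⟩
  · exact ⟨'玖', by decide, by decide⟩

theorem gBL_ne_nil (s : List Char) (hd : ∀ c ∈ s, c ∈ DIG) (h : s ≠ []) : gBL s ≠ [] := by
  induction s with
  | nil => exact absurd rfl h
  | cons d t ih =>
    cases t with
    | nil =>
      by_cases h0 : d = '0'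
      · simp [gBL, h0]
      · obtain ⟨c, hc, -⟩ := hanD_single d (hd d (by simp)) h0
        simp [gBL, h0, hc]
    | cons d' rest =>
      have htail : gBL (d' :: rest) ≠ [] :=
        ih (fun c hc => hd c (List.mem_cons_of_mem d hc)) (by simp)
      simp only [gBL]
      exact fun hcontra => htail (List.append_eq_nil_iff.mp hcontra).2

-- what B's phase-1 loop appends for a suffix, as a string
def gB : List Char → String
  | [] => ""
  | [d] => if d = '0' then "零" else hanD d
  | d :: d' :: rest =>
      (if d = '0' then "零" else hanD d ++ unitR (rest.length + 1)) ++ gB (d' :: rest)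

theorem gB_toList (s : List Char) : (gB s).toList = gBL s := by
  induction s using gB.induct with
  | case1 => rfl
  | case2 => rfl
  | case3 d h0 => simp [gB, gBL, h0]
  | case4 d d' rest ih =>
    by_cases h0 : d = '0' <;> simp [gB, gBL, h0, ih]

theorem foldA (suf : List Char) : ∀ (pre : List Char) (acc : String),
    (∀ c ∈ suf, c ∈ DIG) →
    (PySem.List.pyRange (pre.length : Int) (((pre ++ suf).length : Nat) : Int) 1).foldl
      (stepA (pre ++ suf) (((pre ++ suf).length : Nat) : Int)) acc
      = acc ++ gA suf := by
  induction suf with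
  | nil =>
    intro pre acc _
    rw [List.append_nil, PySem.List.pyRange_one_eq_nil (le_refl _)]
    simp [gA]
  | cons d rest ih =>
    intro pre acc hdig
    have hdd : d ∈ DIG := hdig d (by simp)
    have hdrest : ∀ c ∈ rest, c ∈ DIG := fun c hc => hdig c (by simp [hc])
    have hgi : PySem.List.pyGet? (pre ++ d :: rest) ((pre.length : Nat) : Int) = some d := by
      rw [PySem.List.pyGet?_natCast, List.getElem?_append_right (le_refl pre.length)]
      simp
    have hlen : (((pre ++ d :: rest).length : Nat) : Int)
        = (pre.length : Int) + (rest.length : Int) + 1 := by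
      push_cast [List.length_append, List.length_cons, List.length_nil]; omega
    have hlt : ((pre.length : Nat) : Int) < (((pre ++ d :: rest).length : Nat) : Int) := by
      rw [hlen]; omega
    rw [PySem.List.pyRange_one_cons hlt, List.foldl_cons]
    have hIH := ih (pre ++ [d])
      (stepA (pre ++ d :: rest) (((pre ++ d :: rest).length : Nat) : Int) acc
        ((pre.length : Nat) : Int)) hdrest
    rw [show (pre ++ [d]) ++ rest = pre ++ d :: rest from by simp] at hIH
    rw [show (((pre ++ [d]).length : Nat) : Int) = ((pre.length : Nat) : Int) + 1 from by
      push_cast [List.length_append, List.length_cons, List.length_nil]; omega] at hIH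
    rw [hIH]
    have hstep : stepA (pre ++ d :: rest) (((pre ++ d :: rest).length : Nat) : Int) acc
        ((pre.length : Nat) : Int) ++ gA rest = acc ++ gA (d :: rest) := by
      unfold stepA
      rw [hgi]
      cases rest with
      | nil =>
        have hceq : ((pre.length : Nat) : Int) = (((pre ++ [d]).length : Nat) : Int) - 1 := by
          push_cast [List.length_append, List.length_cons, List.length_nil]; omega
        by_cases h0 : d = '0'
        · subst h0
          rw [if_pos ⟨hceq, by decide⟩]
          simp [gA]
        · have hnum : ((PySem.Int.ofStr? (String.ofList [d])).getD 0 ≠ 0) :=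
            fun h => h0 ((digit_num_zero d hdd).mp h)
          rw [if_neg (fun h => hnum h.2), if_neg (fun h => h.1 hceq),
            if_neg (fun h => absurd hceq.symm (by omega))]
          simp [gA, h0, hanD]
      | cons d' rest' =>
        have hgi2 : PySem.List.pyGet? (pre ++ d :: d' :: rest') (((pre.length : Nat) : Int) + 1)
            = some d' := by
          rw [show ((pre.length : Nat) : Int) + 1 = (((pre.length + 1 : Nat) : Nat) : Int) from by
            push_cast [List.length_cons]; omega]
          rw [PySem.List.pyGet?_natCast,
            List.getElem?_append_right (by omega : pre.length ≤ pre.length + 1)]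
          simp
        have hne : ((pre.length : Nat) : Int) ≠ (((pre ++ d :: d' :: rest').length : Nat) : Int) - 1 := by
          rw [hlen]; push_cast [List.length_cons]; omega
        have hltm : ((pre.length : Nat) : Int) < (((pre ++ d :: d' :: rest').length : Nat) : Int) - 1 := by
          rw [hlen]; push_cast [List.length_cons]; omega
        have hunit : -(4 - (((pre ++ d :: d' :: rest').length : Nat) : Int) + ((pre.length : Nat) : Int)) - 1
            = ((rest'.length + 1 : Nat) : Int) - 4 := by
          rw [hlen]; push_cast [List.length_cons]; omega
        by_cases h0 : d = '0'
        · subst h0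
          rw [if_neg (fun h => hne h.1), if_neg (fun h => h.2 (by decide))]
          by_cases h0' : d' = '0'
          · have hcond : ((pre.length : Nat) : Int) < (((pre ++ '0' :: d' :: rest').length : Nat) : Int) - 1 ∧
                ((some '0').getD ' ' = '0') ∧
                (PySem.List.pyGet? (pre ++ '0' :: d' :: rest') (((pre.length : Nat) : Int) + 1)).getD ' ' = '0' :=
              by
                refine ⟨hltm, ?_, ?_⟩
                · rfl
                · rw [hgi2, h0']
                  exact (rfl : (some '0').getD ' ' = '0')
            rw [if_pos hcond]
            simp [gA, h0']
          · rw [if_neg (fun h => h0' (by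
              have := h.2.2
              rw [hgi2] at this
              simpa using this))]
            rw [show (PySem.List.pyGet? hanListA
                ((PySem.Int.ofStr? (String.ofList [(some '0').getD ' '])).getD 0)).getD ""
              = "零" from by decide]
            simp [gA, h0', String.append_assoc]
        · have hnum : ((PySem.Int.ofStr? (String.ofList [d])).getD 0 ≠ 0) :=
            fun h => h0 ((digit_num_zero d hdd).mp h)
          rw [if_neg (fun h => hnum h.2), if_pos ⟨hne, hnum⟩, hunit]
          simp [gA, h0, hanD, unitR, String.append_assoc]
    rw [hstep]

theorem foldB (suf : List Char) : ∀ (pre : List Char) (acc : String),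
    (∀ c ∈ suf, c ∈ DIG) →
    (PySem.List.pyRange (pre.length : Int) (((pre ++ suf).length : Nat) : Int) 1).foldl
      (stepB (pre ++ suf) (((pre ++ suf).length : Nat) : Int)) acc
      = acc ++ gB suf := by
  induction suf with
  | nil =>
    intro pre acc _
    rw [List.append_nil, PySem.List.pyRange_one_eq_nil (le_refl _)]
    simp [gB]
  | cons d rest ih =>
    intro pre acc hdig
    have hdd : d ∈ DIG := hdig d (by simp)
    have hdrest : ∀ c ∈ rest, c ∈ DIG := fun c hc => hdig c (by simp [hc])
    have hgi : PySem.List.pyGet? (pre ++ d :: rest) ((pre.length : Nat) : Int) = some d := by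
      rw [PySem.List.pyGet?_natCast, List.getElem?_append_right (le_refl pre.length)]
      simp
    have hlen : (((pre ++ d :: rest).length : Nat) : Int)
        = (pre.length : Int) + (rest.length : Int) + 1 := by
      push_cast [List.length_append, List.length_cons, List.length_nil]; omega
    have hlt : ((pre.length : Nat) : Int) < (((pre ++ d :: rest).length : Nat) : Int) := by
      rw [hlen]; omega
    rw [PySem.List.pyRange_one_cons hlt, List.foldl_cons]
    have hIH := ih (pre ++ [d])
      (stepB (pre ++ d :: rest) (((pre ++ d :: rest).length : Nat) : Int) acc
        ((pre.length : Nat) : Int)) hdrest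
    rw [show (pre ++ [d]) ++ rest = pre ++ d :: rest from by simp] at hIH
    rw [show (((pre ++ [d]).length : Nat) : Int) = ((pre.length : Nat) : Int) + 1 from by
      push_cast [List.length_append, List.length_cons, List.length_nil]; omega] at hIH
    rw [hIH]
    have hstep : stepB (pre ++ d :: rest) (((pre ++ d :: rest).length : Nat) : Int) acc
        ((pre.length : Nat) : Int) ++ gB rest = acc ++ gB (d :: rest) := by
      unfold stepB
      rw [hgi]
      cases rest with
      | nil =>
        have hceq : ((pre.length : Nat) : Int) = (((pre ++ [d]).length : Nat) : Int) - 1 := by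
          push_cast [List.length_append, List.length_cons, List.length_nil]; omega
        by_cases h0 : d = '0'
        · subst h0
          rw [if_pos (by decide)]
          simp [gB]
        · have hnum : ((PySem.Int.ofStr? (String.ofList [(some d).getD ' '])).getD 0 ≠ 0) :=
            fun h => h0 ((digit_num_zero d hdd).mp (by simpa using h))
          rw [if_neg hnum, if_neg (fun h => h hceq)]
          simp [gB, h0, hanD]
      | cons d' rest' =>
        have hne : ((pre.length : Nat) : Int) ≠ (((pre ++ d :: d' :: rest').length : Nat) : Int) - 1 := by
          rw [hlen]; push_cast [List.length_cons]; omega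
        have hunit : -(4 - (((pre ++ d :: d' :: rest').length : Nat) : Int) + ((pre.length : Nat) : Int)) - 1
            = ((rest'.length + 1 : Nat) : Int) - 4 := by
          rw [hlen]; push_cast [List.length_cons]; omega
        by_cases h0 : d = '0'
        · subst h0
          rw [if_pos (by decide)]
          simp [gB, String.append_assoc]
        · have hnum : ((PySem.Int.ofStr? (String.ofList [(some d).getD ' '])).getD 0 ≠ 0) :=
            fun h => h0 ((digit_num_zero d hdd).mp (by simpa using h))
          rw [if_neg hnum, if_pos hne, hunit]
          simp [gB, h0, hanD, unitR, String.append_assoc]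
    rw [hstep]

theorem dedupZ_cons_skip (p : Bool) (c : Char) (t : List Char) (h : c = '零' ∧ p = true) :
    dedupZ p (c :: t) = dedupZ p t := by
  rw [dedupZ]; exact if_pos h

theorem dedupZ_cons_keep (p : Bool) (c : Char) (t : List Char) (h : ¬(c = '零' ∧ p = true)) :
    dedupZ p (c :: t) = c :: dedupZ (c == '零') t := by
  rw [dedupZ]; exact if_neg h

theorem foldD (xs : List Char) : ∀ (acc : List Char),
    xs.foldl stepD acc = acc ++ dedupZ (acc.getLast? == some '零') xs := by
  induction xs with
  | nil => intro acc; simp [dedupZ]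
  | cons c t ih =>
    intro acc
    by_cases h : c = '零' ∧ acc.getLast? = some '零'
    · have hne : acc ≠ [] := by
        intro hnil; rw [hnil] at h; simp at h
      have hstep : stepD acc c = acc := by simp [stepD, h.1, h.2, hne]
      rw [List.foldl_cons, hstep, ih acc]
      have hp : (acc.getLast? == some '零') = true := by simp [h.2]
      rw [hp, dedupZ_cons_skip true c t ⟨h.1, rfl⟩]
    · have hstep : stepD acc c = acc ++ [c] := by
        unfold stepD
        split
        · next hcond => exact absurd ⟨hcond.1, hcond.2.2⟩ h
        · rfl
      rw [List.foldl_cons, hstep, ih (acc ++ [c])]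
      have hlast : (acc ++ [c]).getLast? = some c := by simp
      have hnp : ¬(c = '零' ∧ (acc.getLast? == some '零') = true) := by
        intro hcontra
        exact h ⟨hcontra.1, by simpa using hcontra.2⟩
      rw [hlast, dedupZ_cons_keep _ c t hnp, List.append_assoc]
      rfl

theorem gBL_cons_zero (t : List Char) : gBL ('0' :: t) = '零' :: gBL t := by
  cases t with
  | nil => simp [gBL]
  | cons d' rest => simp [gBL]

theorem unitR_no_zero (r : Nat) : ∀ c ∈ (unitR r).toList, c ≠ '零' := by
  by_cases h : r ≤ 7
  · interval_cases r <;>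
      simp [unitR, unitListA, PySem.List.pyGet?, PySem.List.pyIdx?]
  · have h4 : ((r : Int) - 4) = ((r - 4 : Nat) : Int) := by omega
    have hnone : PySem.List.pyGet? unitListA ((r : Int) - 4) = none := by
      rw [h4, PySem.List.pyGet?_natCast]
      apply List.getElem?_eq_none
      simp [unitListA]; omega
    simp [unitR, hnone]

theorem dedupZ_false_append (p : List Char) (hp : ∀ c ∈ p, c ≠ '零') :
    ∀ xs, dedupZ false (p ++ xs) = p ++ dedupZ false xs := by
  induction p with
  | nil => intro xs; rfl
  | cons c p' ih =>
    intro xs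
    have hc : c ≠ '零' := hp c (by simp)
    have hcb : (c == '零') = false := by simp [hc]
    rw [List.cons_append, dedupZ_cons_keep false c (p' ++ xs) (by simp [hc]), hcb,
      ih (fun c hc => hp c (by simp [hc])) xs]
    simp

theorem main_norm (s : List Char) (hd : ∀ c ∈ s, c ∈ DIG) :
    stripZ (dedupZ false (gBL s)) = (gA s).toList := by
  induction s using gA.induct with
  | case1 => decide
  | case2 => decide
  | case3 d h0 =>
    obtain ⟨c, hc, hcz⟩ := hanD_single d (hd d (by simp)) h0
    simp [gBL, gA, h0, hc, dedupZ, stripZ, hcz]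
  | case4 d d' rest ih =>
    have hdtail : ∀ c ∈ d' :: rest, c ∈ DIG := fun c hc => hd c (List.mem_cons_of_mem d hc)
    have ih' := ih hdtail
    have hBtail : gBL (d' :: rest) ≠ [] := gBL_ne_nil (d' :: rest) hdtail (by simp)
    by_cases h0 : d = '0'
    · subst h0
      by_cases h0' : d' = '0'
      · -- two adjacent zeros: the extra '零' marker is collapsed by dedupZ
        subst h0'
        rw [gBL_cons_zero]
        rw [gBL_cons_zero] at ih' ⊢
        have hzz : ('零' == '零') = true := by decide
        have e1 : dedupZ false ('零' :: '零' :: gBL rest) = dedupZ false ('零' :: gBL rest) := by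
          rw [dedupZ_cons_keep false '零' ('零' :: gBL rest) (by simp),
              dedupZ_cons_keep false '零' (gBL rest) (by simp), hzz,
              dedupZ_cons_skip true '零' (gBL rest) ⟨rfl, rfl⟩]
        rw [e1, ih']
        simp [gA]
      · -- single zero before a nonzero digit: one '零' survives
        obtain ⟨c, hc, hcz⟩ := hanD_single d' (hdtail d' (by simp)) h0'
        obtain ⟨tail, htail⟩ : ∃ tail, gBL (d' :: rest) = c :: tail := by
          cases rest with
          | nil => exact ⟨[], by simp [gBL, h0', hc]⟩
          | cons r rs =>
            exact ⟨(unitR (rs.length + 1)).toList ++ gBL (r :: rs), by simp [gBL, h0', hc]⟩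
        rw [gBL_cons_zero, htail]
        have hzz : ('零' == '零') = true := by decide
        have hcb : (c == '零') = false := by simp [hcz]
        have e1 : dedupZ false ('零' :: c :: tail) = '零' :: dedupZ false (c :: tail) := by
          rw [dedupZ_cons_keep false '零' (c :: tail) (by simp), hzz,
              dedupZ_cons_keep true c tail (by simp [hcz]), hcb,
              dedupZ_cons_keep false c tail (by simp [hcz]), hcb]
        rw [e1, stripZ_cons _ _ (dedupZ_false_ne_nil (c :: tail) (by simp)), ← htail, ih']
        simp [gA, h0']
    · -- nonzero digit: its hanzi+unit characters contain no '零' and pass through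
      obtain ⟨c, hc, hcz⟩ := hanD_single d (hd d (by simp)) h0
      have hp : ∀ x ∈ (hanD d).toList ++ (unitR (rest.length + 1)).toList, x ≠ '零' := by
        intro x hx
        rcases List.mem_append.mp hx with hx | hx
        · rw [hc] at hx
          simp at hx
          exact hx ▸ hcz
        · exact unitR_no_zero _ x hx
      have hgBL : gBL (d :: d' :: rest)
          = ((hanD d).toList ++ (unitR (rest.length + 1)).toList) ++ gBL (d' :: rest) := by
        simp [gBL, h0]
      rw [hgBL, dedupZ_false_append _ hp,
        stripZ_append _ _ (dedupZ_false_ne_nil _ hBtail), ih']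
      simp [gA, h0]

-- ===== VERDICT (by name: the statement is the Claim_ definition above) =====
theorem strip_if_eq_stripZ (out : List Char) :
    (if out ≠ [] ∧ out.getLast? = some '零' then out.dropLast else out) = stripZ out := by
  unfold stripZ
  by_cases h : out.getLast? = some '零'
  · rw [if_pos ⟨fun hnil => by simp [hnil] at h, h⟩, if_pos h]
  · rw [if_neg (fun hh => h hh.2), if_neg h]

theorem four_to_han_str_spec : Claim_equal_four_to_han_str := by
  intro ns _ hpre
  unfold Spec_four_to_han_str
  have hdig : ∀ c ∈ ns.toList, c ∈ DIG := fun c hc => by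
    have := List.all_eq_true.mp hpre.1 c hc
    simpa [DIG] using this
  have hA : four_to_han_str ns = gA ns.toList := by
    unfold four_to_han_str
    simpa using foldA ns.toList [] "" hdig
  have hB : four_to_han_str_alt ns = String.ofList (stripZ (dedupZ false (gBL ns.toList))) := by
    unfold four_to_han_str_alt
    have hraw : (PySem.List.pyRange ((0 : Nat) : Int) ((ns.toList.length : Nat) : Int) 1).foldl
        (stepB ns.toList ((ns.toList.length : Nat) : Int)) "" = gB ns.toList := by
      simpa using foldB ns.toList [] "" hdig
    simp only [Nat.cast_zero] at hraw
    simp only [hraw, foldD, gB_toList, List.getLast?_nil, List.nil_append,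
      show ((none : Option Char) == some '零') = false from rfl]
    rw [strip_if_eq_stripZ]
  rw [hA, hB, main_norm ns.toList hdig]
  simp
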